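-- pv_equiv track=rewrite | github.com/Azim-Islam/Problem-Solving-DSA | USACO.GUIDE/SILVER/Binary Search/CF_1117_C.py | check
-- ===== SOURCE A (Python) =====
-- def check(x1, y1, x2, y2, time, s):
--     wind_x = 0
--     wind_y = 0
--
--     for c in s:
--         if c == "U":
--             wind_y += 1
--         if c == "D":
--             wind_y -= 1
--         if c == "L":
--             wind_x -= 1
--         if c == "R":
--             wind_x += 1
--
--     wind_x *= time//len(s)
--     wind_y *= time//len(s)
--
--     for i in range(time%len(s)):
--         c = s[i]
--         if c == "U":
--             wind_y += 1
--         if c == "D":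
--             wind_y -= 1
--         if c == "L":
--             wind_x -= 1
--         if c == "R":
--             wind_x += 1
--
--     x1 += wind_x
--     y1 += wind_y
--     return abs(x1 - x2) + abs(y1 - y2) <= time
-- ===== SOURCE B (Python) =====
-- def check(x1, y1, x2, y2, time, s):
--     # Each character s[i] fires at steps i, i+n, i+2n, ...; within the first
--     # `time` steps it fires exactly ceil((time - i) / n) times (floor form below).
--     # So one pass over s with that closed-form multiplicity gives the whole
--     # displacement -- no full-cycle/remainder split and no second scan.
--     n = len(s)
--     dx = 0
--     dy = 0
--     for i, c in enumerate(s):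
--         k = (time - i + n - 1) // n
--         if c == "R":
--             dx += k
--         elif c == "L":
--             dx -= k
--         elif c == "U":
--             dy += k
--         elif c == "D":
--             dy -= k
--     return abs(x1 + dx - x2) + abs(y1 + dy - y2) <= time
-- ===== Notes on version B (the rewrite author's own statement) =====
-- stated objective: alternative
-- what changed: B drops A's full-cycle/remainder decomposition entirely: a single enumerate pass multiplies each character's unit displacement by its closed-form occurrence count ceil((time-i)/len(s)) among the first `time` moves, so there is no cycle quotient, no remainder re-scan and no running wind accumulator over repeated characters.
import Mathlib
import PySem

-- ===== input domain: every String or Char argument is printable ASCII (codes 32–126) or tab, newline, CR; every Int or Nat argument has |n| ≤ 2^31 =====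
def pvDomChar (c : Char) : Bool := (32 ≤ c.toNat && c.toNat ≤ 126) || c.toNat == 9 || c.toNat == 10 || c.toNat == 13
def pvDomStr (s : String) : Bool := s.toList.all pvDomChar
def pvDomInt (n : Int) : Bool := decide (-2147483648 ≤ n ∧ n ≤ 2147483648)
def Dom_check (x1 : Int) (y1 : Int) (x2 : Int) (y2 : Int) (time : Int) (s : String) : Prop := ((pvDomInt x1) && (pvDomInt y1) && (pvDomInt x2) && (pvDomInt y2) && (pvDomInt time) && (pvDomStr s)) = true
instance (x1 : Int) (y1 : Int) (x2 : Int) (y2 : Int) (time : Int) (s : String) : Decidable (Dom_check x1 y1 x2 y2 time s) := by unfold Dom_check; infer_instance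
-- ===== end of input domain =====

-- B replaces A's full-cycle/remainder decomposition by one enumerate pass weighting each
-- character by its closed-form occurrence count among the first `time` moves; alternative
-- decomposition, same asymptotic cost.

-- ===== PORT A =====
-- the per-character wind update of A's loops (same chain of four ifs)
def checkStep (w : Int × Int) (c : Char) : Int × Int :=
  let w := if c = 'U' then (w.1, w.2 + 1) else w
  let w := if c = 'D' then (w.1, w.2 - 1) else w
  let w := if c = 'L' then (w.1 - 1, w.2) else w
  let w := if c = 'R' then (w.1 + 1, w.2) else w
  w

def check (x1 : Int) (y1 : Int) (x2 : Int) (y2 : Int) (time : Int) (s : String) : Bool :=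
  let wind := s.toList.foldl checkStep (0, 0)
  let n : Int := PySem.Str.len s
  let wx := wind.1 * PySem.Int.floordiv time n
  let wy := wind.2 * PySem.Int.floordiv time n
  let wind2 := (PySem.List.pyRange 0 (PySem.Int.mod time n) 1).foldl
    (fun w i => checkStep w (PySem.List.pyGetD s.toList i ' ')) (wx, wy)
  -- pyGetD's default ' ' is never read: under Pre_check the index is in range
  decide (|x1 + wind2.1 - x2| + |y1 + wind2.2 - y2| ≤ time)

-- ===== PORT B =====
-- one step of Source B's loop: add k = (time - i + n - 1) // n in the direction of c (elif chain)
def checkAltStep (time : Int) (n : Int) (w : Int × Int) (p : Int × Char) : Int × Int :=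
  let k := PySem.Int.floordiv (time - p.1 + n - 1) n
  if p.2 = 'R' then (w.1 + k, w.2)
  else if p.2 = 'L' then (w.1 - k, w.2)
  else if p.2 = 'U' then (w.1, w.2 + k)
  else if p.2 = 'D' then (w.1, w.2 - k)
  else w

def check_alt (x1 : Int) (y1 : Int) (x2 : Int) (y2 : Int) (time : Int) (s : String) : Bool :=
  let n : Int := PySem.Str.len s
  let w := (PySem.List.enumerate s.toList 0).foldl (checkAltStep time n) (0, 0)
  decide (|x1 + w.1 - x2| + |y1 + w.2 - y2| ≤ time)

-- ===== PRECONDITION & SPEC =====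
-- Pre_ excludes only s = "", on which A raises ZeroDivisionError (time//len(s)).
def Pre_check (x1 : Int) (y1 : Int) (x2 : Int) (y2 : Int) (time : Int) (s : String) : Prop := s.toList ≠ []
instance (x1 : Int) (y1 : Int) (x2 : Int) (y2 : Int) (time : Int) (s : String) : Decidable (Pre_check x1 y1 x2 y2 time s) := by unfold Pre_check; infer_instance
def pvWitness_check : Int × Int × Int × Int × Int × String := (0, 0, 1, 1, 5, "RUL")

def Spec_check (x1 : Int) (y1 : Int) (x2 : Int) (y2 : Int) (time : Int) (s : String) (out : Bool) : Prop := out = check_alt x1 y1 x2 y2 time s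
instance (x1 : Int) (y1 : Int) (x2 : Int) (y2 : Int) (time : Int) (s : String) (out : Bool) : Decidable (Spec_check x1 y1 x2 y2 time s out) := by unfold Spec_check; infer_instance

-- ===== CLAIM (what is proved, stated in full; the proofs are below) =====
def Claim_equal_check : Prop := ∀ (x1 : Int) (y1 : Int) (x2 : Int) (y2 : Int) (time : Int) (s : String), Dom_check x1 y1 x2 y2 time s → Pre_check x1 y1 x2 y2 time s → Spec_check x1 y1 x2 y2 time s (check x1 y1 x2 y2 time s)

-- ===== LEMMAS AND PROOFS =====

def dX (c : Char) : Int := (if c = 'R' then 1 else 0) - (if c = 'L' then 1 else 0)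
def dY (c : Char) : Int := (if c = 'U' then 1 else 0) - (if c = 'D' then 1 else 0)
def sX (l : List Char) : Int := (l.map dX).sum
def sY (l : List Char) : Int := (l.map dY).sum

theorem checkStep_eq (w : Int × Int) (c : Char) :
    checkStep w c = (w.1 + dX c, w.2 + dY c) := by
  simp only [checkStep, dX, dY]
  split_ifs <;> simp_all <;> omega

theorem foldA (l : List Char) (w : Int × Int) :
    l.foldl checkStep w = (w.1 + sX l, w.2 + sY l) := by
  induction l generalizing w with
  | nil => simp [sX, sY]
  | cons c t ih => simp [List.foldl_cons, checkStep_eq, ih, sX, sY]; constructor <;> ring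

theorem foldA2 (l : List Char) (k : Nat) (hk : k ≤ l.length) (w : Int × Int) :
    (PySem.List.pyRange 0 (k : Int) 1).foldl
      (fun w i => checkStep w (PySem.List.pyGetD l i ' ')) w
    = (w.1 + sX (l.take k), w.2 + sY (l.take k)) := by
  induction k generalizing w with
  | zero => simp [PySem.List.pyRange_one_eq_nil, sX, sY]
  | succ k ih =>
    have hk' : k ≤ l.length := Nat.le_of_succ_le hk
    have hlt : k < l.length := hk
    have htake : l.take (k + 1) = l.take k ++ [l[k]] := by
      rw [List.take_succ, List.getElem?_eq_getElem hlt]; rfl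
    rw [show ((k + 1 : Nat) : Int) = (k : Int) + 1 by push_cast; ring,
        PySem.List.pyRange_one_succ_right (Int.natCast_nonneg k), List.foldl_append,
        ih hk', List.foldl_cons, List.foldl_nil,
        PySem.List.pyGetD_eq_getElem l ' ' (Int.natCast_nonneg k) (by exact_mod_cast hlt),
        checkStep_eq, htake]
    simp only [Int.toNat_natCast, sX, sY, List.map_append, List.sum_append,
      List.map_cons, List.map_nil, List.sum_cons, List.sum_nil, Prod.mk.injEq]
    constructor <;> ring

-- B-side: the multiplicity of index i among the first `time` moves
def kMul (time : Int) (n : Int) (i : Int) : Int := PySem.Int.floordiv (time - i + n - 1) n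

theorem checkAltStep_eq (time n : Int) (w : Int × Int) (p : Int × Char) :
    checkAltStep time n w p = (w.1 + dX p.2 * kMul time n p.1, w.2 + dY p.2 * kMul time n p.1) := by
  simp only [checkAltStep, kMul, dX, dY]
  split_ifs <;> simp_all <;> ring

theorem foldB (time n : Int) (el : List (Int × Char)) (w : Int × Int) :
    el.foldl (checkAltStep time n) w
    = (w.1 + (el.map (fun p => dX p.2 * kMul time n p.1)).sum,
       w.2 + (el.map (fun p => dY p.2 * kMul time n p.1)).sum) := by
  induction el generalizing w with
  | nil => simp
  | cons p t ih =>
    simp only [List.foldl_cons, checkAltStep_eq, ih, List.map_cons, List.sum_cons, Prod.mk.injEq]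
    constructor <;> ring

-- the closed-form multiplicity equals q + [i < r]
theorem kMul_eq (time n i : Int) (hn : 0 < n) (h0 : 0 ≤ i) (hi : i < n) :
    kMul time n i
    = PySem.Int.floordiv time n + (if i < PySem.Int.mod time n then 1 else 0) := by
  have hqr := PySem.Int.floordiv_mul_add_mod time n
  have hr0 := PySem.Int.mod_nonneg time hn
  have hrlt := PySem.Int.mod_lt time hn
  set q := PySem.Int.floordiv time n
  set r := PySem.Int.mod time n
  unfold kMul
  rw [PySem.Int.floordiv_eq_iff_of_pos hn]
  split_ifs with h
  · exact ⟨by nlinarith, by nlinarith⟩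
  · exact ⟨by nlinarith, by nlinarith⟩

-- constant-multiplicity sum over one enumerate block
theorem sum_block (f : Char → Int) (time n c : Int) (m : List Char) (st : Int)
    (hc : ∀ i : Int, st ≤ i → i < st + m.length → kMul time n i = c) :
    ((PySem.List.enumerate m st).map (fun p => f p.2 * kMul time n p.1)).sum
    = c * (m.map f).sum := by
  induction m generalizing st with
  | nil => simp [PySem.List.enumerate_nil]
  | cons x t ih =>
    rw [PySem.List.enumerate_cons]
    simp only [List.map_cons, List.sum_cons]
    rw [hc st le_rfl (by simp only [List.length_cons]; push_cast; omega),
        ih (st + 1) (fun i h1 h2 => hc i (by omega)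
          (by simp only [List.length_cons] at h2 ⊢; push_cast at h2 ⊢; omega))]
    ring

theorem check_eq_general (x1 y1 x2 y2 time : Int) (s : String) (hpre : s.toList ≠ []) :
    check x1 y1 x2 y2 time s = check_alt x1 y1 x2 y2 time s := by
  unfold check check_alt
  have hlen : 0 < s.toList.length := List.length_pos_iff.mpr hpre
  have hn : PySem.Str.len s = (s.toList.length : Int) := by simp [PySem.Str.len_eq]
  set l := s.toList with hl
  have hnpos : (0 : Int) < (l.length : Int) := by exact_mod_cast hlen
  -- A's value
  simp only [hn, foldA, zero_add]
  have hr0 : 0 ≤ PySem.Int.mod time (l.length : Int) := PySem.Int.mod_nonneg _ hnpos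
  have hrlt : PySem.Int.mod time (l.length : Int) < (l.length : Int) := PySem.Int.mod_lt _ hnpos
  set q := PySem.Int.floordiv time (l.length : Int) with hq
  set r := PySem.Int.mod time (l.length : Int) with hrdef
  have hk : r.toNat ≤ l.length := by omega
  rw [show r = ((r.toNat : Nat) : Int) by omega, foldA2 l _ hk]
  -- B's value
  have hsplit : l = l.take r.toNat ++ l.drop r.toNat := (List.take_append_drop _ _).symm
  rw [foldB]
  conv_rhs => rw [hsplit, PySem.List.enumerate_append]
  simp only [List.map_append, List.sum_append, zero_add, List.take_append_drop]
  have hlenTake : (l.take r.toNat).length = r.toNat := by simp [hk]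
  have hc1 : ∀ i : Int, (0:Int) ≤ i → i < 0 + ((l.take r.toNat).length : Int) →
      kMul time (l.length : Int) i = q + 1 := by
    intro i h1 h2; rw [hlenTake] at h2
    rw [kMul_eq _ _ _ hnpos h1 (by omega), ← hq, ← hrdef, if_pos (by omega)]
  have hc2 : ∀ i : Int, ((l.take r.toNat).length : Int) ≤ i →
      i < ((l.take r.toNat).length : Int) + ((l.drop r.toNat).length : Int) →
      kMul time (l.length : Int) i = q := by
    intro i h1 h2; rw [hlenTake] at h1; simp only [List.length_drop] at h2
    rw [kMul_eq _ _ _ hnpos (by omega) (by push_cast at h1 h2 ⊢; omega), ← hq, ← hrdef,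
        if_neg (by push_cast at h1; omega)]
    ring
  rw [sum_block dX _ _ (q + 1) _ 0 hc1, sum_block dY _ _ (q + 1) _ 0 hc1,
      sum_block dX _ _ q _ ((l.take r.toNat).length : Int) hc2,
      sum_block dY _ _ q _ ((l.take r.toNat).length : Int) hc2]
  rw [decide_eq_decide]
  have hsx : sX l = sX (l.take r.toNat) + sX (l.drop r.toNat) := by
    conv_lhs => rw [hsplit]
    simp [sX]
  have hsy : sY l = sY (l.take r.toNat) + sY (l.drop r.toNat) := by
    conv_lhs => rw [hsplit]
    simp [sY]
  rw [hsx, hsy]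
  unfold sX sY
  constructor <;> intro h <;> [skip; skip] <;> (ring_nf at h ⊢; linarith)

-- ===== VERDICT (by name: the statement is the Claim_ definition above) =====
theorem check_spec : Claim_equal_check := by
  intro x1 y1 x2 y2 time s _ hpre
  exact check_eq_general x1 y1 x2 y2 time s hpre
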